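-- pv_equiv track=rewrite | github.com/DekrovDev/dekrov-ai-userbot-public | ai/groq_client.py | _ordered_models
-- ===== SOURCE A (Python) =====
-- from typing import Iterable
--
-- def _ordered_models(
--     active_model: str, available_models: Iterable[str]
-- ) -> list[str]:
--     models = [model for model in available_models if model]
--     if active_model not in models:
--         models.insert(0, active_model)
--     ordered = [active_model]
--     ordered.extend(model for model in models if model != active_model)
--     seen: set[str] = set()
--     unique: list[str] = []
--     for model in ordered:
--         if model in seen:
--             continue
--         seen.add(model)
--         unique.append(model)
--     return unique
-- ===== SOURCE B (Python) =====
-- def _ordered_models(active_model, available_models):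
--     seen = {active_model}
--     result = [active_model]
--     for model in available_models:
--         if model and model not in seen:
--             seen.add(model)
--             result.append(model)
--     return result
-- ===== Notes on version B (the rewrite author's own statement) =====
-- stated objective: simpler
-- what changed: A's four sequential passes (truthy filter, conditional insert at 0, extend-with-filter, separate dedup loop) are replaced by a single loop over available_models with seen initialised to {active_model} and result to [active_model].
import Mathlib
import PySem

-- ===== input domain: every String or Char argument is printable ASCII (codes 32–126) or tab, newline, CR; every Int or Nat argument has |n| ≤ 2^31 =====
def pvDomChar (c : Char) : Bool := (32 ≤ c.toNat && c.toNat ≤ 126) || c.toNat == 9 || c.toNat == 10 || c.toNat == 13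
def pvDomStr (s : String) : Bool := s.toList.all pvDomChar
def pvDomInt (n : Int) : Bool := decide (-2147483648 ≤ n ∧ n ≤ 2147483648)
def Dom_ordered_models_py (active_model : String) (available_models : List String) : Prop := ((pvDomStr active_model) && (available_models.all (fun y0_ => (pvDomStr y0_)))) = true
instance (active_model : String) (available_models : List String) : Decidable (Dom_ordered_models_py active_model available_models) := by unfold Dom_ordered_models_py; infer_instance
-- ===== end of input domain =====

-- B replaces A's four sequential passes (filter, insert, extend-filter, dedup loop) by a single
-- pass over available_models with seen initialised to {active_model}; same return value, simpler.

-- ===== PORT A =====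
def ordered_models_py (active_model : String) (available_models : List String) : List String :=
  -- models = [model for model in available_models if model]
  let models := available_models.filter (fun m => m != "")
  -- if active_model not in models: models.insert(0, active_model)
  let models := if models.contains active_model then models
                else PySem.List.insert models 0 active_model
  -- ordered = [active_model]; ordered.extend(model for model in models if model != active_model)
  let ordered := active_model :: models.filter (fun m => m != active_model)
  -- seen = set(); unique = []; for model in ordered: …
  (ordered.foldl
    (fun (st : PySem.Set String × List String) m =>
      if PySem.Set.contains st.1 m then st
      else (PySem.Set.add st.1 m, st.2 ++ [m]))
    ((PySem.Set.empty : PySem.Set String), [])).2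

-- ===== PORT B =====
def ordered_models_py_alt (active_model : String) (available_models : List String) : List String :=
  -- seen = {active_model}; result = [active_model]
  -- for model in available_models: if model and model not in seen: seen.add(model); result.append(model)
  (available_models.foldl
    (fun (st : PySem.Set String × List String) m =>
      if (m != "") && !(PySem.Set.contains st.1 m) then (PySem.Set.add st.1 m, st.2 ++ [m])
      else st)
    (PySem.Set.add (PySem.Set.empty : PySem.Set String) active_model, [active_model])).2

-- ===== PRECONDITION & SPEC =====
def Spec_ordered_models_py (active_model : String) (available_models : List String) (out : List String) : Prop := out = ordered_models_py_alt active_model available_models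
instance (active_model : String) (available_models : List String) (out : List String) : Decidable (Spec_ordered_models_py active_model available_models out) := by unfold Spec_ordered_models_py; infer_instance

-- ===== CLAIM (what is proved, stated in full; the proofs are below) =====
def Claim_equal_ordered_models_py : Prop := ∀ (active_model : String) (available_models : List String), Dom_ordered_models_py active_model available_models → Spec_ordered_models_py active_model available_models (ordered_models_py active_model available_models)

-- ===== LEMMAS AND PROOFS =====

theorem pv_contains_add (s : PySem.Set String) (a m : String)
    (h : PySem.Set.contains s a = true) :
    PySem.Set.contains (PySem.Set.add s m) a = true := by
  by_cases hm : m ∈ s <;> simp_all [PySem.Set.add, PySem.Set.contains]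

-- B's single loop over `available_models` computes the same final state as A's dedup loop over
-- the already-filtered list, whenever `seen` contains `active_model`.
theorem pv_loop_eq (active_model : String) :
    ∀ (l : List String) (s : PySem.Set String) (acc : List String),
      PySem.Set.contains s active_model = true →
      l.foldl
        (fun (st : PySem.Set String × List String) m =>
          if (m != "") && !(PySem.Set.contains st.1 m) then (PySem.Set.add st.1 m, st.2 ++ [m])
          else st) (s, acc)
      = (l.filter (fun m => (m != "") && (m != active_model))).foldl
          (fun (st : PySem.Set String × List String) m =>
            if PySem.Set.contains st.1 m then st
            else (PySem.Set.add st.1 m, st.2 ++ [m])) (s, acc) := by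
  intro l
  induction l with
  | nil => intro s acc _; rfl
  | cons m l ih =>
    intro s acc hs
    by_cases hemp : m = ""
    · subst hemp
      simpa using ih s acc hs
    · by_cases hact : m = active_model
      · subst hact
        simp only [List.foldl_cons, List.filter_cons, hs, bne_self_eq_false, Bool.and_false,
          Bool.not_true, Bool.false_eq_true, if_false]
        exact ih s acc hs
      · have h1 : (m != "") = true := by simp [hemp]
        have h2 : (m != active_model) = true := by simp [hact]
        simp only [List.foldl_cons, List.filter_cons, h1, h2, Bool.and_self, Bool.true_and,
          if_true]
        by_cases hc : PySem.Set.contains s m = true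
        · simp only [hc, Bool.not_true, if_true]
          exact ih s acc hs
        · simp only [Bool.not_eq_true] at hc
          simp only [hc, Bool.not_false, if_true]
          exact ih (PySem.Set.add s m) (acc ++ [m]) (pv_contains_add s active_model m hs)

-- the insert-at-0 pass changes nothing once `active_model` is filtered out again
theorem pv_filter_if (a : String) (ms : List String) :
    (if ms.contains a then ms else PySem.List.insert ms 0 a).filter (fun m => m != a)
      = ms.filter (fun m => m != a) := by
  split
  · rfl
  · rw [PySem.List.insert_zero]
    simp

theorem pv_filter_comp (a : String) (av : List String) :
    (av.filter (fun m => m != "")).filter (fun m => m != a)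
      = av.filter (fun m => (m != "") && (m != a)) := by
  rw [List.filter_filter]
  exact List.filter_congr (fun x _ => Bool.and_comm _ _)

theorem pv_init_contains (a : String) :
    PySem.Set.contains (PySem.Set.add (PySem.Set.empty : PySem.Set String) a) a = true := by
  simp [PySem.Set.add, PySem.Set.empty, PySem.Set.contains]

theorem pv_ports_eq (a : String) (av : List String) :
    ordered_models_py a av = ordered_models_py_alt a av := by
  unfold ordered_models_py ordered_models_py_alt
  simp only [pv_filter_if, pv_filter_comp]
  rw [pv_loop_eq a av _ _ (pv_init_contains a), List.foldl_cons]
  simp [PySem.Set.contains, PySem.Set.empty, PySem.Set.add]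

-- ===== VERDICT (by name: the statement is the Claim_ definition above) =====
theorem ordered_models_py_spec : Claim_equal_ordered_models_py := by
  intro a av _
  unfold Spec_ordered_models_py
  exact pv_ports_eq a av
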